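-- pv_equiv track=rewrite | github.com/yunsejin/Algorithm | 백준/Silver/1417. 국회의원 선거/국회의원 선거.py | min_bribes
-- ===== SOURCE A (Python) =====
-- def min_bribes(votes):
--     dasom_votes = votes[0]
--     other_votes = votes[1:]
--
--     bribes = 0
--
--     if not other_votes:
--         return 0
--
--     while dasom_votes <= max(other_votes):
--         max_votes = max(other_votes)
--         max_index = other_votes.index(max_votes)
--         other_votes[max_index] -= 1
--         dasom_votes += 1
--         bribes += 1
--
--     return bribes
-- ===== SOURCE B (Python) =====
-- def min_bribes(votes):
--     dasom = votes[0]
--     others = sorted(votes[1:], reverse=True)  # descending: others[0] is always the current max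
--     bribes = 0
--     while others and dasom <= others[0]:
--         m = others[0] - 1
--         rest = others[1:]
--         # reinsert the decremented leader, keeping the list descending:
--         # skip past the (usually short) run of values still greater than m
--         i = 0
--         while i < len(rest) and rest[i] > m:
--             i += 1
--         rest.insert(i, m)
--         others = rest
--         dasom += 1
--         bribes += 1
--     return bribes
-- ===== Notes on version B (the rewrite author's own statement) =====
-- stated objective: faster
-- what changed: B sorts the other candidates' votes descending once and then keeps the list sorted by reinserting the decremented leader past the short run of equal values, instead of A's full max() and .index() scans of the list on every bribe.
import Mathlib
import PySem

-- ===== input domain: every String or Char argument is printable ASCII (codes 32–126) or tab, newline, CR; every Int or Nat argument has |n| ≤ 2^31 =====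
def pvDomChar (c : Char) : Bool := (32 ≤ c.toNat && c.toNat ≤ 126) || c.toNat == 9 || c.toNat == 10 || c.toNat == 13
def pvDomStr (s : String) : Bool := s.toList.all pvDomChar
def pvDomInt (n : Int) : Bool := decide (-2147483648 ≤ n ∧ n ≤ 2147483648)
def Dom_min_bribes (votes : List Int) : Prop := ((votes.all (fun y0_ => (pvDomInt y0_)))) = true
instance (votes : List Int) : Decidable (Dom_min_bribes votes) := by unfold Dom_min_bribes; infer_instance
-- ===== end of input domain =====

-- B keeps the others sorted descending and reinserts the decremented leader, instead of
-- A's full max()/index() scans per bribe (objective: faster, constant-factor).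

-- ===== PORT A =====
-- the while loop; fuel is only a totality guard (sufficient by the wrapper's choice below)
def aLoop : Nat → Int → List Int → Int → Int
  | 0, _, _, bribes => bribes
  | fuel + 1, dasom, others, bribes =>
    match PySem.List.max? others (fun x => x) with
    | none => bribes      -- unreachable: others is nonempty throughout the loop
    | some m =>
      if dasom ≤ m then
        let i := (PySem.List.index? others m).getD 0
        aLoop fuel (dasom + 1) (others.set i (m - 1)) (bribes + 1)
      else bribes

def min_bribes (votes : List Int) : Int :=
  -- votes[0] raises IndexError on []: excluded by Pre_; 0 is an arbitrary value there
  let dasom := (PySem.List.pyGet? votes 0).getD 0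
  let others := PySem.List.slice votes (some 1) none
  if others = [] then 0
  else
    let m0 := ((PySem.List.max? others (fun x => x)).getD dasom)
    aLoop (m0 - dasom + 1).toNat dasom others 0

-- ===== PORT B =====
-- insert m into a descending-sorted list, skipping the run of values > m  (Source B's inner while)
def bInsert (m : Int) : List Int → List Int
  | [] => [m]
  | y :: ys => if y > m then y :: bInsert m ys else m :: y :: ys

def bLoop : Nat → Int → List Int → Int → Int
  | 0, _, _, bribes => bribes
  | fuel + 1, dasom, others, bribes =>
    match others with
    | [] => bribes
    | m :: rest =>
      if dasom ≤ m then bLoop fuel (dasom + 1) (bInsert (m - 1) rest) (bribes + 1)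
      else bribes

def min_bribes_alt (votes : List Int) : Int :=
  let dasom := (PySem.List.pyGet? votes 0).getD 0
  let others := PySem.List.sorted (PySem.List.slice votes (some 1) none) (fun x => x) true
  let m0 := others.headD dasom
  bLoop (m0 - dasom + 1).toNat dasom others 0

-- ===== PRECONDITION & SPEC =====
-- A raises IndexError (votes[0]) on the empty list; it returns on every nonempty list.
def Pre_min_bribes (votes : List Int) : Prop := votes ≠ []
instance (votes : List Int) : Decidable (Pre_min_bribes votes) := by unfold Pre_min_bribes; infer_instance
def pvWitness_min_bribes : List Int := [3, 5, 5]

def Spec_min_bribes (votes : List Int) (out : Int) : Prop := out = min_bribes_alt votes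
instance (votes : List Int) (out : Int) : Decidable (Spec_min_bribes votes out) := by unfold Spec_min_bribes; infer_instance

-- ===== CLAIM (what is proved, stated in full; the proofs are below) =====
def Claim_equal_min_bribes : Prop := ∀ (votes : List Int), Dom_min_bribes votes → Pre_min_bribes votes → Spec_min_bribes votes (min_bribes votes)

-- ===== LEMMAS AND PROOFS =====

theorem bInsert_perm (m : Int) (l : List Int) : (bInsert m l).Perm (m :: l) := by
  induction l with
  | nil => simp [bInsert]
  | cons y ys ih =>
    simp only [bInsert]
    split
    · exact ((ih.cons y).trans (List.Perm.swap m y ys))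
    · exact List.Perm.refl _

theorem bInsert_pairwise (m : Int) (l : List Int) (h : l.Pairwise (· ≥ ·)) :
    (bInsert m l).Pairwise (· ≥ ·) := by
  induction l with
  | nil => simp [bInsert]
  | cons y ys ih =>
    rw [List.pairwise_cons] at h
    simp only [bInsert]
    split
    · rename_i hy
      rw [List.pairwise_cons]
      refine ⟨?_, ih h.2⟩
      intro z hz
      rcases List.mem_cons.mp ((bInsert_perm m ys).mem_iff.mp hz) with hz | hz
      · omega
      · exact h.1 z hz
    · rename_i hy
      rw [List.pairwise_cons]
      refine ⟨?_, List.pairwise_cons.mpr h⟩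
      intro z hz
      rcases List.mem_cons.mp hz with hz | hz
      · omega
      · have := h.1 z hz; omega

-- A's step: writing max-1 at the first index of the maximum is, up to permutation,
-- consing max-1 onto the list with one copy of the maximum removed
theorem step_perm (l : List Int) (m x : Int) (hm : m ∈ l) :
    (l.set ((PySem.List.index? l m).getD 0) x).Perm (x :: l.erase m) := by
  obtain ⟨j, hj⟩ := Option.isSome_iff_exists.mp (List.isSome_idxOf?.mpr hm)
  obtain ⟨hlt, -, -⟩ := List.idxOf?_eq_some_iff.mp hj
  rw [PySem.List.index?_eq_idxOf?, hj, List.erase_eq_eraseIdx, hj]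
  exact List.set_perm_cons_eraseIdx hlt x

theorem bLoop_nil (f : Nat) (d b : Int) : bLoop f d [] b = b := by
  cases f <;> rfl

-- core invariant: with equal fuel, A's working list stays a permutation of B's
-- descending-sorted working list, and the loops return the same bribe count
theorem loop_eq (fuel : Nat) (dasom bribes : Int) (oA oB : List Int)
    (hperm : oA.Perm oB) (hsorted : oB.Pairwise (· ≥ ·)) :
    aLoop fuel dasom oA bribes = bLoop fuel dasom oB bribes := by
  induction fuel generalizing dasom bribes oA oB with
  | zero => rfl
  | succ f ih =>
    cases oB with
    | nil =>
      have : oA = [] := hperm.eq_nil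
      subst this
      simp [aLoop, bLoop, PySem.List.max?]
    | cons m rest =>
      have hAne : oA ≠ [] := by
        intro h
        subst h
        simpa using hperm.length_eq
      obtain ⟨m', hm'⟩ : ∃ m', PySem.List.max? oA (fun x => x) = some m' := by
        cases hmx : PySem.List.max? oA (fun x => x) with
        | none => exact absurd ((PySem.List.max?_eq_none_iff oA (fun x => x)).mp hmx) hAne
        | some v => exact ⟨v, rfl⟩
      have hm'mem : m' ∈ oA := PySem.List.max?_mem hm'
      have hmax : ∀ y ∈ oA, y ≤ m' := PySem.List.max?_isMax hm'
      have hhead : ∀ y ∈ rest, y ≤ m := fun y hy => (List.pairwise_cons.mp hsorted).1 y hy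
      have hmm : m' = m := by
        have h1 : m ≤ m' := hmax m (hperm.mem_iff.mpr (by simp))
        have h2 : m' ≤ m := by
          rcases List.mem_cons.mp (hperm.mem_iff.mp hm'mem) with h | h
          · omega
          · exact hhead m' h
        omega
      subst hmm
      simp only [aLoop, bLoop, hm']
      split
      · apply ih
        · refine (step_perm oA m' (m' - 1) hm'mem).trans ?_
          refine ((hperm.erase m').cons (m' - 1)).trans ?_
          rw [List.erase_cons_head]
          exact (bInsert_perm (m' - 1) rest).symm
        · exact bInsert_pairwise _ _ (List.pairwise_cons.mp hsorted).2
      · rfl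

-- the head of the descending sort is Python's max() of the list
theorem max_eq_head (l : List Int) (m : Int) (t : List Int) (d : Int)
    (h : PySem.List.sorted l (fun x => x) true = m :: t) :
    (PySem.List.max? l (fun x => x)).getD d = m := by
  have hmem : m ∈ l := by
    have := PySem.List.sorted_perm l (fun x => x) true
    rw [h] at this
    exact this.mem_iff.mp (by simp)
  obtain ⟨m', hm'⟩ : ∃ m', PySem.List.max? l (fun x => x) = some m' := by
    cases hmx : PySem.List.max? l (fun x => x) with
    | none =>
      have : l = [] := (PySem.List.max?_eq_none_iff l fun x => x).mp hmx
      subst this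
      simp at hmem
    | some v => exact ⟨v, rfl⟩
  rw [hm']
  have h1 : m ≤ m' := PySem.List.max?_isMax hm' m hmem
  have h2 : m' ≤ m := PySem.List.key_head_sorted_rev_ge l (fun x => x) h m' (PySem.List.max?_mem hm')
  simp
  omega

-- ===== VERDICT (by name: the statement is the Claim_ definition above) =====
theorem min_bribes_spec : Claim_equal_min_bribes := by
  intro votes _ hpre
  unfold Spec_min_bribes min_bribes min_bribes_alt
  cases hS : PySem.List.sorted (PySem.List.slice votes (some 1) none) (fun x => x) true with
  | nil =>
    have hO : PySem.List.slice votes (some 1) none = [] :=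
      (PySem.List.sorted_eq_nil_iff _ _ _).mp hS
    simp [hO, bLoop_nil]
  | cons m rest =>
    have hO : PySem.List.slice votes (some 1) none ≠ [] := by
      intro h
      rw [h] at hS
      simp [PySem.List.sorted] at hS
    simp only [if_neg hO, List.headD_cons]
    rw [max_eq_head _ _ _ _ hS]
    exact loop_eq _ _ _ _ _ ((PySem.List.sorted_perm _ _ _).symm.trans (by rw [hS]))
      (hS ▸ (PySem.List.sorted_pairwise_rev _ _).imp (fun h => h))
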